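-- pv_equiv track=rewrite | github.com/jinhyuk9714/songsim-campus-mcp | src/songsim_campus/services.py | _period_start_minutes
-- ===== SOURCE A (Python) =====
-- CLASS_PERIODS = [
--     (1, "09:00", "09:50"),
--     (2, "10:00", "10:50"),
--     (3, "11:00", "11:50"),
--     (4, "12:00", "12:50"),
--     (5, "13:00", "13:50"),
--     (6, "14:00", "14:50"),
--     (7, "15:00", "15:50"),
--     (8, "16:00", "16:50"),
--     (9, "17:00", "17:50"),
--     (10, "18:00", "18:50"),
-- ]
--
-- def _period_start_minutes(period: int | None) -> int | None:
--     if period is None: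
--         return None
--     for item_period, start, _ in CLASS_PERIODS:
--         if item_period == period:
--             hour, minute = start.split(":")
--             return int(hour) * 60 + int(minute)
--     return None
-- ===== SOURCE B (Python) =====
-- def _period_start_minutes(period):
--     if period is None:
--         return None
--     if 1 <= period <= 10:
--         return (period + 8) * 60
--     return None
-- ===== Notes on version B (the rewrite author's own statement) =====
-- stated objective: simpler
-- what changed: Replaces the table scan and string parsing of CLASS_PERIODS with a closed-form range check and arithmetic: period p starts at (p+8)*60 minutes.
import Mathlib
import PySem

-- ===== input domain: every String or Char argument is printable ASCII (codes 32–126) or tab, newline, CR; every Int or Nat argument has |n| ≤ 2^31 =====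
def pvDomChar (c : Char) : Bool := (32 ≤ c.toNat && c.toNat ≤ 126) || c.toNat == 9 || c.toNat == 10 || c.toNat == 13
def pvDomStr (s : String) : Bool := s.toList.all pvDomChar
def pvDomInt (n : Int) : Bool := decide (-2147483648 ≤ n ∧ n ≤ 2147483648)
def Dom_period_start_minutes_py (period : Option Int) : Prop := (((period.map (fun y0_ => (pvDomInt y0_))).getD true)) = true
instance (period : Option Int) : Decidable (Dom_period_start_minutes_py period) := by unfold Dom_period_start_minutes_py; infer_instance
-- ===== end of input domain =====

-- B replaces A's table scan over CLASS_PERIODS (with string parsing of start times) by a closed-form range check and arithmetic: simpler.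


-- ===== PORT A =====
-- CLASS_PERIODS module constant
def classPeriods : List (Int × String × String) :=
  [(1, "09:00", "09:50"), (2, "10:00", "10:50"), (3, "11:00", "11:50"),
   (4, "12:00", "12:50"), (5, "13:00", "13:50"), (6, "14:00", "14:50"),
   (7, "15:00", "15:50"), (8, "16:00", "16:50"), (9, "17:00", "17:50"),
   (10, "18:00", "18:50")]

-- the 'for … in CLASS_PERIODS' loop body: 'hour, minute = start.split(":")' then
-- 'int(hour) * 60 + int(minute)'. The .getD 0 defaults can never fire on the fixed
-- table literals (every start is "HH:MM"), so the port is exact here.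
def loopA : List (Int × String × String) → Int → Option Int
  | [], _ => none
  | (itemPeriod, start, _) :: rest, period =>
    if itemPeriod == period then
      match PySem.Str.split? start ":" with
      | some [hour, minute] => some ((PySem.Int.ofStr? hour).getD 0 * 60 + (PySem.Int.ofStr? minute).getD 0)
      | _ => none  -- unreachable for the table literals (unpacking would raise)
    else loopA rest period

def period_start_minutes_py (period : Option Int) : Option Int :=
  match period with
  | none => none
  | some p => loopA classPeriods p

-- ===== PORT B =====
def period_start_minutes_py_alt (period : Option Int) : Option Int :=
  match period with
  | none => none
  | some p => if 1 ≤ p ∧ p ≤ 10 then some ((p + 8) * 60) else none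

-- ===== PRECONDITION & SPEC =====
def Spec_period_start_minutes_py (period : Option Int) (out : Option Int) : Prop := out = period_start_minutes_py_alt period
instance (period : Option Int) (out : Option Int) : Decidable (Spec_period_start_minutes_py period out) := by unfold Spec_period_start_minutes_py; infer_instance

-- ===== CLAIM (what is proved, stated in full; the proofs are below) =====
def Claim_equal_period_start_minutes_py : Prop := ∀ (period : Option Int), Dom_period_start_minutes_py period → Spec_period_start_minutes_py period (period_start_minutes_py period)

-- ===== LEMMAS AND PROOFS =====

-- the scan returns none when no table entry carries the requested period
theorem loopA_eq_none (l : List (Int × String × String)) (p : Int)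
    (h : ∀ t ∈ l, t.1 ≠ p) : loopA l p = none := by
  induction l with
  | nil => rfl
  | cons hd tl ih =>
    obtain ⟨ip, st, en⟩ := hd
    have hne : ip ≠ p := h (ip, st, en) (by simp)
    simp only [loopA, beq_iff_eq, if_neg hne]
    exact ih fun t ht => h t (List.mem_cons_of_mem _ ht)

-- ===== VERDICT (by name: the statement is the Claim_ definition above) =====
theorem period_start_minutes_py_spec : Claim_equal_period_start_minutes_py := by
  intro period _
  unfold Spec_period_start_minutes_py period_start_minutes_py period_start_minutes_py_alt
  rcases period with _ | p
  · rfl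
  · by_cases h1 : p = 1; · subst h1; decide
    by_cases h2 : p = 2; · subst h2; decide
    by_cases h3 : p = 3; · subst h3; decide
    by_cases h4 : p = 4; · subst h4; decide
    by_cases h5 : p = 5; · subst h5; decide
    by_cases h6 : p = 6; · subst h6; decide
    by_cases h7 : p = 7; · subst h7; decide
    by_cases h8 : p = 8; · subst h8; decide
    by_cases h9 : p = 9; · subst h9; decide
    by_cases h10 : p = 10; · subst h10; decide
    show loopA classPeriods p = if 1 ≤ p ∧ p ≤ 10 then some ((p + 8) * 60) else none
    rw [if_neg (by omega)]
    exact loopA_eq_none _ p (by intro t ht; fin_cases ht <;> simpa using by omega)
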